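-- pv_equiv track=rewrite | github.com/SoulofProvidence/STFormat4TC3.1 | format_tc_st.py | format_case_blocks
-- ===== SOURCE A (Python) =====
-- INDENT_SIZE = 4
--
-- def format_case_blocks(st: str, indent_size: int = INDENT_SIZE) -> str:
--     """
--     Druga faza: porządkowanie CASE:
--     - etykiety na jednym poziomie
--     - instrukcje (i ';') o 1 poziom głębiej
--     - jeśli po etykiecie jest kod + osobny ';' -> ';' usuwamy
--     - jeśli jest tylko ';' (puste ramię) -> zostawiamy jedno
--     """
--     lines = st.splitlines()
--     result = []
--     inside_case = False
--     case_base_indent = None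
--     label_indent = None
--     last_label_has_code = False
--     last_label_index = None
--
--     def count_leading_spaces(s: str) -> int:
--         return len(s) - len(s.lstrip(" "))
--
--     for idx, line in enumerate(lines):
--         stripped = line.lstrip()
--         upper = stripped.upper()
--
--         # CASE ... OF
--         if upper.startswith("CASE ") and upper.endswith(" OF"):
--             inside_case = True
--             case_base_indent = count_leading_spaces(line)
--             label_indent = None
--             last_label_has_code = False
--             last_label_index = None
--             result.append(line)
--             continue
--
--         if inside_case:
--             # KONIEC CASE
--             if upper.startswith("END_CASE"):
--                 inside_case = False
--                 case_base_indent = None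
--                 label_indent = None
--                 last_label_has_code = False
--                 last_label_index = None
--                 result.append(line)
--                 continue
--
--             # Pusta linia / komentarz
--             if stripped == "" or stripped.startswith("//") or stripped.startswith("(*"):
--                 result.append(line)
--                 continue
--
--             # Etykieta: xxx:
--             if stripped.endswith(":"):
--                 if label_indent is None:
--                     label_indent = count_leading_spaces(line)
--                 indent_spaces = " " * label_indent
--                 result.append(indent_spaces + stripped)
--                 last_label_has_code = False
--                 last_label_index = len(result) - 1
--                 continue
--
--             # Samotne ';'
--             if stripped == ";":
--                 if last_label_index is not None:
--                     if last_label_has_code: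
--                         # Był już kod po tej etykiecie -> ';' jest śmieciem, usuwamy
--                         continue
--                     else:
--                         # Puste ramię – zostaw placeholder ';' we wcięciu głębiej
--                         effective_label_indent = label_indent if label_indent is not None else (case_base_indent or 0)
--                         stmt_indent = effective_label_indent + indent_size
--                         result.append(" " * stmt_indent + ";")
--                         continue
--                 else:
--                     # ';' bez etykiety – zostaw jak jest
--                     result.append(line)
--                     continue
--
--             # Normalna linia kodu w CASE: wcięta 1 poziom głębiej niż etykieta
--             effective_label_indent = label_indent if label_indent is not None else (case_base_indent or 0)
--             stmt_indent = effective_label_indent + indent_size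
--             result.append(" " * stmt_indent + stripped)
--             last_label_has_code = True
--             continue
--
--         # Poza CASE – przepisujemy bez zmian
--         result.append(line)
--
--     return "\n".join(result)
-- ===== SOURCE B (Python) =====
-- INDENT_SIZE = 4
--
--
-- def _leading_spaces(s: str) -> int:
--     return len(s) - len(s.lstrip(" "))
--
--
-- def _is_case_start(line: str) -> bool:
--     u = line.lstrip().upper()
--     return u.startswith("CASE ") and u.endswith(" OF")
--
--
-- def _is_end_case(line: str) -> bool:
--     return line.lstrip().upper().startswith("END_CASE")
--
--
-- def format_one_case_block(block, indent_size):
--     """Reindent one collected CASE block (header line first, END_CASE line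
--     last if the block was terminated before EOF)."""
--     res = [block[0]]
--     base = _leading_spaces(block[0])
--     label_indent = None
--     has_code = False
--     seen_label = False
--     for line in block[1:]:
--         stripped = line.lstrip()
--         upper = stripped.upper()
--         if upper.startswith("CASE ") and upper.endswith(" OF"):
--             # nested CASE header: restart label tracking
--             base = _leading_spaces(line)
--             label_indent = None
--             has_code = False
--             seen_label = False
--             res.append(line)
--         elif upper.startswith("END_CASE"):
--             res.append(line)
--         elif stripped == "" or stripped.startswith("//") or stripped.startswith("(*"):
--             res.append(line)
--         elif stripped.endswith(":"):
--             if label_indent is None: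
--                 label_indent = _leading_spaces(line)
--             res.append(" " * label_indent + stripped)
--             has_code = False
--             seen_label = True
--         elif stripped == ";":
--             if seen_label:
--                 if not has_code:
--                     eff = label_indent if label_indent is not None else base
--                     res.append(" " * (eff + indent_size) + ";")
--                 # otherwise the ';' is junk after real code: drop it
--             else:
--                 res.append(line)
--         else:
--             eff = label_indent if label_indent is not None else base
--             res.append(" " * (eff + indent_size) + stripped)
--             has_code = True
--     return res
--
--
-- def format_case_blocks(st: str, indent_size: int = INDENT_SIZE) -> str:
--     lines = st.splitlines()
--     out = []
--     i = 0
--     n = len(lines)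
--     while i < n:
--         line = lines[i]
--         if _is_case_start(line):
--             j = i + 1
--             while j < n and not _is_end_case(lines[j]):
--                 j += 1
--             block = lines[i:j + 1]  # header .. END_CASE (or to EOF)
--             out.extend(format_one_case_block(block, indent_size))
--             i = j + 1
--         else:
--             out.append(line)
--             i += 1
--     return "\n".join(out)
-- ===== Notes on version B (the rewrite author's own statement) =====
-- stated objective: alternative
-- what changed: Replaces A's single stateful line loop (inside_case flag threaded across the whole file) by a two-phase decomposition: a segmentation pass that copies non-CASE lines verbatim and slices out each CASE..END_CASE block, plus a helper format_one_case_block that reindents one block with local label state.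
import Mathlib
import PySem

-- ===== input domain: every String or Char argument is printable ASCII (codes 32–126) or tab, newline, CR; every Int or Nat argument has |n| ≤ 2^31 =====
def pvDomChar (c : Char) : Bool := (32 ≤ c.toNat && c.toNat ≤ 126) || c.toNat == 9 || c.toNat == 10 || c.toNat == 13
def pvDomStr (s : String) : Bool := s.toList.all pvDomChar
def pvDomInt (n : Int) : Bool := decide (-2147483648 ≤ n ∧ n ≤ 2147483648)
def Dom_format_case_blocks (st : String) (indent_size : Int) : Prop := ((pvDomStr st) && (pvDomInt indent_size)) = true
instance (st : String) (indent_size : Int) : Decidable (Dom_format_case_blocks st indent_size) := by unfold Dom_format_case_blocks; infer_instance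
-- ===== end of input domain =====

-- B restructures A: a segmentation pass copies non-CASE lines verbatim and slices out each
-- CASE..END_CASE block, and a per-block helper reindents the block; return values proved equal.

-- shared per-line expressions (both Pythons compute these literally)
-- count_leading_spaces: len(s) - len(s.lstrip(" ")) = number of leading ' ' (exact: lstrip(" ") drops exactly leading spaces)
def pvLead (s : String) : Nat := (s.toList.takeWhile (· == ' ')).length
def pvStripped (s : String) : String := PySem.Str.lstrip s          -- line.lstrip()
def pvUpper (s : String) : String := PySem.Str.upper (pvStripped s) -- stripped.upper()
-- upper.startswith("CASE ") and upper.endswith(" OF")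
def pvIsCase (s : String) : Bool :=
  PySem.Str.startswith (pvUpper s) "CASE " && PySem.Str.endswith (pvUpper s) " OF"
-- upper.startswith("END_CASE")
def pvIsEnd (s : String) : Bool := PySem.Str.startswith (pvUpper s) "END_CASE"
-- stripped == "" or stripped.startswith("//") or stripped.startswith("(*")
def pvIsSkip (s : String) : Bool :=
  pvStripped s == "" || PySem.Str.startswith (pvStripped s) "//" || PySem.Str.startswith (pvStripped s) "(*"
def pvIsLabel (s : String) : Bool := PySem.Str.endswith (pvStripped s) ":"  -- stripped.endswith(":")
def pvIsSemi (s : String) : Bool := pvStripped s == ";"                     -- stripped == ";"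
def pvSpaces (n : Int) : String := String.ofList (List.replicate n.toNat ' ')   -- " " * n ("" for n < 0, as in Python)

-- ===== PORT A =====
-- A's single loop over the lines; state = (inside_case, case_base_indent, label_indent,
-- last_label_has_code, last_label_index), result is the accumulator (last_label_index is
-- some (index of the appended label), exactly as in the Python).
def loopA (isz : Int) : List String → Bool → Option Nat → Option Nat → Bool → Option Nat →
    List String → List String
  | [], _, _, _, _, _, result => result
  | line :: rest, inside, base, lab, hc, lli, result =>
    if pvIsCase line then
      loopA isz rest true (some (pvLead line)) none false none (result ++ [line])
    else if inside then
      if pvIsEnd line then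
        loopA isz rest false none none false none (result ++ [line])
      else if pvIsSkip line then
        loopA isz rest inside base lab hc lli (result ++ [line])
      else if pvIsLabel line then
        loopA isz rest inside base (some (lab.getD (pvLead line))) false (some result.length)
          (result ++ [pvSpaces ((lab.getD (pvLead line)) : Int) ++ pvStripped line])
      else if pvIsSemi line then
        if lli.isSome then
          if hc then
            loopA isz rest inside base lab hc lli result
          else
            loopA isz rest inside base lab hc lli
              (result ++ [pvSpaces ((lab.getD (base.getD 0) : Int) + isz) ++ ";"])
        else
          loopA isz rest inside base lab hc lli (result ++ [line])
      else
        loopA isz rest inside base lab true lli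
          (result ++ [pvSpaces ((lab.getD (base.getD 0) : Int) + isz) ++ pvStripped line])
    else
      loopA isz rest inside base lab hc lli (result ++ [line])

def format_case_blocks (st : String) (indent_size : Int) : String :=
  PySem.Str.join "\n" (loopA indent_size (PySem.Str.splitlines st) false none none false none [])

-- ===== PORT B =====
-- inner scan: collect lines up to and including the first END_CASE line (block = lines[i:j+1])
def pvSplitBlock : List String → List String × List String
  | [] => ([], [])
  | l :: ls =>
    if pvIsEnd l then ([l], ls)
    else
      let p := pvSplitBlock ls
      (l :: p.1, p.2)

theorem pvSplitBlock_snd_length_le : ∀ ls : List String, (pvSplitBlock ls).2.length ≤ ls.length := by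
  intro ls
  induction ls with
  | nil => simp [pvSplitBlock]
  | cons l ls ih =>
    simp only [pvSplitBlock]
    split
    · simp
    · simpa using Nat.le_succ_of_le ih

-- format_one_case_block's loop over block[1:], with the header already emitted;
-- state = (base, label_indent, has_code, seen_label)
def fmtBody (isz : Int) : List String → Nat → Option Nat → Bool → Bool → List String
  | [], _, _, _, _ => []
  | line :: rest, base, lab, hc, sl =>
    if pvIsCase line then
      line :: fmtBody isz rest (pvLead line) none false false
    else if pvIsEnd line then
      line :: fmtBody isz rest base lab hc sl
    else if pvIsSkip line then
      line :: fmtBody isz rest base lab hc sl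
    else if pvIsLabel line then
      (pvSpaces ((lab.getD (pvLead line)) : Int) ++ pvStripped line)
        :: fmtBody isz rest base (some (lab.getD (pvLead line))) false true
    else if pvIsSemi line then
      if sl then
        if hc then fmtBody isz rest base lab hc sl
        else (pvSpaces ((lab.getD base : Int) + isz) ++ ";") :: fmtBody isz rest base lab hc sl
      else line :: fmtBody isz rest base lab hc sl
    else
      (pvSpaces ((lab.getD base : Int) + isz) ++ pvStripped line) :: fmtBody isz rest base lab true sl

-- the outer while loop: passthrough, or slice out a block and hand it to the helper
def segB (isz : Int) : List String → List String
  | [] => []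
  | line :: rest =>
    if pvIsCase line then
      let p := pvSplitBlock rest
      (line :: fmtBody isz p.1 (pvLead line) none false false) ++ segB isz p.2
    else
      line :: segB isz rest
termination_by ls => ls.length
decreasing_by
  · exact Nat.lt_succ_of_le (pvSplitBlock_snd_length_le rest)
  · simp

def format_case_blocks_alt (st : String) (indent_size : Int) : String :=
  PySem.Str.join "\n" (segB indent_size (PySem.Str.splitlines st))

-- ===== PRECONDITION & SPEC =====
def Spec_format_case_blocks (st : String) (indent_size : Int) (out : String) : Prop := out = format_case_blocks_alt st indent_size
instance (st : String) (indent_size : Int) (out : String) : Decidable (Spec_format_case_blocks st indent_size out) := by unfold Spec_format_case_blocks; infer_instance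

-- ===== CLAIM (what is proved, stated in full; the proofs are below) =====
def Claim_equal_format_case_blocks : Prop := ∀ (st : String) (indent_size : Int), Dom_format_case_blocks st indent_size → Spec_format_case_blocks st indent_size (format_case_blocks st indent_size)

-- ===== LEMMAS AND PROOFS =====

-- a CASE header line is never an END_CASE line
theorem pvIsCase_not_isEnd {s : String} (h : pvIsCase s = true) : pvIsEnd s = false := by
  unfold pvIsCase at h
  unfold pvIsEnd
  rw [Bool.and_eq_true] at h
  by_contra hend
  rw [Bool.not_eq_false] at hend
  have h1 := h.1
  simp only [PySem.Str.startswith_eq] at h1 hend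
  rw [PySem.Chars.startswith_iff] at h1 hend
  have hpre : "CASE ".toList <+: "END_CASE".toList :=
    List.prefix_of_prefix_length_le h1 hend (by decide)
  revert hpre; decide

theorem pvSplitBlock_cons_end {l : String} (ls : List String) (h : pvIsEnd l = true) :
    pvSplitBlock (l :: ls) = ([l], ls) := by
  simp [pvSplitBlock, h]

theorem pvSplitBlock_cons_notend {l : String} (ls : List String) (h : pvIsEnd l = false) :
    pvSplitBlock (l :: ls) = (l :: (pvSplitBlock ls).1, (pvSplitBlock ls).2) := by
  simp [pvSplitBlock, h]

-- the accumulator factors out (loopA only reads last_label_index through isSome)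
theorem loopA_acc (isz : Int) : ∀ (lines : List String) inside base lab hc
    (lli lli' : Option Nat), lli.isSome = lli'.isSome → ∀ acc,
    loopA isz lines inside base lab hc lli acc
      = acc ++ loopA isz lines inside base lab hc lli' [] := by
  intro lines
  induction lines with
  | nil => intro _ _ _ _ _ _ _ acc; simp [loopA]
  | cons l ls ih =>
    intro inside base lab hc lli lli' h acc
    simp only [loopA, h, List.nil_append, List.length_nil]
    split_ifs with h1 h2 h3 h4 h5 h6 h7 h8
    · rw [ih true (some (pvLead l)) none false none none rfl (acc ++ [l]),
          ih true (some (pvLead l)) none false none none rfl [l]]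
      simp
    · rw [ih false none none false none none rfl (acc ++ [l]),
          ih false none none false none none rfl [l]]
      simp
    · rw [ih inside base lab hc lli lli' h (acc ++ [l]),
          ih inside base lab hc lli' lli' rfl [l]]
      simp
    · rw [ih inside base (some (lab.getD (pvLead l))) false (some acc.length) (some 0) rfl
            (acc ++ [pvSpaces ((lab.getD (pvLead l)) : Int) ++ pvStripped l]),
          ih inside base (some (lab.getD (pvLead l))) false (some 0) (some 0) rfl
            [pvSpaces ((lab.getD (pvLead l)) : Int) ++ pvStripped l]]
      simp
    · exact ih inside base lab hc lli lli' h acc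
    · rw [ih inside base lab hc lli lli' h
            (acc ++ [pvSpaces (((lab.getD (base.getD 0)) : Int) + isz) ++ ";"]),
          ih inside base lab hc lli' lli' rfl
            [pvSpaces (((lab.getD (base.getD 0)) : Int) + isz) ++ ";"]]
      simp
    · rw [ih inside base lab hc lli lli' h (acc ++ [l]),
          ih inside base lab hc lli' lli' rfl [l]]
      simp
    · rw [ih inside base lab true lli lli' h
            (acc ++ [pvSpaces (((lab.getD (base.getD 0)) : Int) + isz) ++ pvStripped l]),
          ih inside base lab true lli' lli' rfl
            [pvSpaces (((lab.getD (base.getD 0)) : Int) + isz) ++ pvStripped l]]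
      simp
    · rw [ih inside base lab hc lli lli' h (acc ++ [l]),
          ih inside base lab hc lli' lli' rfl [l]]
      simp

-- inside a CASE block, A's loop = helper on the sliced block ++ A's loop outside on the rest
theorem loopA_inside (isz : Int) : ∀ (lines : List String) (b : Nat) lab hc (lli : Option Nat),
    loopA isz lines true (some b) lab hc lli []
      = fmtBody isz (pvSplitBlock lines).1 b lab hc lli.isSome
        ++ loopA isz (pvSplitBlock lines).2 false none none false none [] := by
  intro lines
  induction lines with
  | nil => intro b lab hc lli; simp [loopA, pvSplitBlock, fmtBody]
  | cons l ls ih =>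
    intro b lab hc lli
    by_cases h1 : pvIsCase l = true
    · have hend : pvIsEnd l = false := pvIsCase_not_isEnd h1
      rw [pvSplitBlock_cons_notend ls hend]
      simp only [loopA, fmtBody, h1, if_true, List.nil_append]
      rw [loopA_acc isz ls true (some (pvLead l)) none false none none rfl [l],
          ih (pvLead l) none false none]
      simp
    · by_cases h2 : pvIsEnd l = true
      · rw [pvSplitBlock_cons_end ls h2]
        simp only [loopA, fmtBody, h1, h2, if_true, Bool.false_eq_true, if_false,
          List.nil_append]
        rw [loopA_acc isz ls false none none false none none rfl [l]]
      · have h2' : pvIsEnd l = false := by rwa [Bool.not_eq_true] at h2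
        rw [pvSplitBlock_cons_notend ls h2']
        by_cases h3 : pvIsSkip l = true
        · simp only [loopA, fmtBody, h1, h2, h3, if_true, Bool.false_eq_true, if_false,
            List.nil_append]
          rw [loopA_acc isz ls true (some b) lab hc lli lli rfl [l],
              ih b lab hc lli]
          simp
        · by_cases h4 : pvIsLabel l = true
          · simp only [loopA, fmtBody, h1, h2, h3, h4, if_true, Bool.false_eq_true,
              if_false, List.nil_append, List.length_nil]
            rw [loopA_acc isz ls true (some b) (some (lab.getD (pvLead l))) false
                  (some 0) (some 0) rfl
                  [pvSpaces ((lab.getD (pvLead l)) : Int) ++ pvStripped l],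
                ih b (some (lab.getD (pvLead l))) false (some 0)]
            simp
          · by_cases h5 : pvIsSemi l = true
            · by_cases h6 : lli.isSome = true
              · by_cases h7 : hc = true
                · simp only [loopA, fmtBody, h1, h2, h3, h4, h5, h6, h7, if_true,
                    Bool.false_eq_true, if_false, List.nil_append]
                  rw [ih b lab true lli, h6]
                · simp only [loopA, fmtBody, h1, h2, h3, h4, h5, h6, h7, if_true,
                    Bool.false_eq_true, if_false, List.nil_append, Option.getD_some]
                  rw [loopA_acc isz ls true (some b) lab false lli lli rfl
                        [pvSpaces (((lab.getD b) : Int) + isz) ++ ";"],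
                      ih b lab false lli, h6]
                  simp
              · rw [Bool.not_eq_true] at h6
                simp only [loopA, fmtBody, h1, h2, h3, h4, h5, h6, if_true,
                  Bool.false_eq_true, if_false, List.nil_append]
                rw [loopA_acc isz ls true (some b) lab hc lli lli rfl [l],
                    ih b lab hc lli, h6]
                simp
            · simp only [loopA, fmtBody, h1, h2, h3, h4, h5, if_true, Bool.false_eq_true,
                if_false, List.nil_append, Option.getD_some]
              rw [loopA_acc isz ls true (some b) lab true lli lli rfl
                    [pvSpaces (((lab.getD b) : Int) + isz) ++ pvStripped l],
                  ih b lab true lli]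
              simp

-- outside a CASE block, A's loop is B's segmentation
theorem loopA_outside (isz : Int) : ∀ (lines : List String),
    loopA isz lines false none none false none [] = segB isz lines := by
  intro lines
  fun_induction segB isz lines with
  | case1 => simp [loopA]
  | case2 line rest h p ih =>
    simp only [loopA, h, if_true, List.nil_append]
    rw [loopA_acc isz rest true (some (pvLead line)) none false none none rfl [line],
        loopA_inside isz rest (pvLead line) none false none,
        ih]
    rfl
  | case3 line rest h ih =>
    simp only [loopA, h, Bool.false_eq_true, if_false, List.nil_append]
    rw [loopA_acc isz rest false none none false none none rfl [line], ih]
    rfl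

-- ===== VERDICT (by name: the statement is the Claim_ definition above) =====
theorem format_case_blocks_spec : Claim_equal_format_case_blocks := by
  intro st isz _
  unfold Spec_format_case_blocks format_case_blocks format_case_blocks_alt
  rw [loopA_outside]
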